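-- pv_equiv track=rewrite | github.com/mr-bigbang/advent-of-code | 2015/03/code.py | get_houses
-- ===== SOURCE A (Python) =====
-- from typing import List, Tuple
--
-- def get_houses(directions: str) -> List[Tuple[int]]:
--     # North-South & East-West Coordinates
--     ns, ew = 0, 0
--     # Origin is always visited
--     visited_coords = [(ns, ew), ]
--     for d in directions:
--         if d == "^":
--             ns += 1
--         elif d == "v":
--             ns -= 1
--         elif d == "<":
--             ew -= 1
--         elif d == ">":
--             ew += 1
--         else:
--             pass
--
--         visited_coords.append((ns, ew))
--
--     return visited_coords
-- ===== SOURCE B (Python) =====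
-- _DELTAS = {"^": (1, 0), "v": (-1, 0), "<": (0, -1), ">": (0, 1)}
--
-- def get_houses(directions: str):
--     # Divide and conquer: the path of u+v is the path of u followed by the
--     # path of v translated by u's endpoint.
--     if not directions:
--         return [(0, 0)]
--     if len(directions) == 1:
--         return [(0, 0), _DELTAS.get(directions, (0, 0))]
--     mid = len(directions) // 2
--     left = get_houses(directions[:mid])
--     right = get_houses(directions[mid:])
--     a, b = left[-1]
--     return left + [(a + x, b + y) for (x, y) in right[1:]]
-- ===== Notes on version B (the rewrite author's own statement) =====
-- stated objective: alternative
-- what changed: Replaces the single-pass state-mutating loop with a divide-and-conquer recursion: split the direction string in half, recursively compute each half's path, and translate the right half's path by the left half's endpoint.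
import Mathlib
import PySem

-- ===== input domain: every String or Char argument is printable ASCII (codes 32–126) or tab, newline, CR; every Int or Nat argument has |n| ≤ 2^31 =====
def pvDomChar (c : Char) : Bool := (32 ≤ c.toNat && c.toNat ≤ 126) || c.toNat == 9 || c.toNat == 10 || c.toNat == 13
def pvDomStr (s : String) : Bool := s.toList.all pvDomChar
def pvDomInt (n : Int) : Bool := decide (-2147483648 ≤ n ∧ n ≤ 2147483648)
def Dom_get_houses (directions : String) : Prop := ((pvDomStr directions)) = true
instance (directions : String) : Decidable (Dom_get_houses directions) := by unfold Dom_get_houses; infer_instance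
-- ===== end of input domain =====

-- B replaces A's single-pass state-mutating loop with a divide-and-conquer recursion:
-- split the string in half, compute each half's path, translate the right half's
-- path by the left half's endpoint; an alternative algorithm, not claimed faster.

-- ===== PORT A =====
-- one loop step of A: branch on d, update (ns, ew), append the new position
def get_houses_step (st : (Int × Int) × List (Int × Int)) (d : Char) : (Int × Int) × List (Int × Int) :=
  let p :=
    if d = '^' then (st.1.1 + 1, st.1.2)
    else if d = 'v' then (st.1.1 - 1, st.1.2)
    else if d = '<' then (st.1.1, st.1.2 - 1)
    else if d = '>' then (st.1.1, st.1.2 + 1)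
    else st.1
  (p, st.2 ++ [p])

def get_houses (directions : String) : List (Int × Int) :=
  (directions.toList.foldl get_houses_step ((0, 0), [((0 : Int), (0 : Int))])).2

-- ===== PORT B =====
-- _DELTAS.get(d, (0, 0))
def get_houses_delta (d : Char) : Int × Int :=
  if d = '^' then (1, 0)
  else if d = 'v' then (-1, 0)
  else if d = '<' then (0, -1)
  else if d = '>' then (0, 1)
  else (0, 0)

-- the divide-and-conquer recursion of Source B, on the character list; directions[:mid]
-- and directions[mid:] with 0 ≤ mid ≤ len are exactly take/drop, right[1:] is tail,
-- left[-1] is PySem.List.pyGet? left (-1) (left is always nonempty, so getD's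
-- default is never used)
def get_houses_rec (l : List Char) : List (Int × Int) :=
  match l with
  | [] => [(0, 0)]
  | [d] => [(0, 0), get_houses_delta d]
  | d₁ :: d₂ :: rest =>
    let l' := d₁ :: d₂ :: rest
    let mid := l'.length / 2
    let left := get_houses_rec (l'.take mid)
    let right := get_houses_rec (l'.drop mid)
    let p := (PySem.List.pyGet? left (-1)).getD (0, 0)
    left ++ right.tail.map (fun q => (p.1 + q.1, p.2 + q.2))
termination_by l.length
decreasing_by
  · simp only [List.length_take]; simp only [List.length_cons]; omega
  · simp only [List.length_drop]; simp only [List.length_cons]; omega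

def get_houses_alt (directions : String) : List (Int × Int) :=
  get_houses_rec directions.toList

-- ===== PRECONDITION & SPEC =====
def Spec_get_houses (directions : String) (out : List (Int × Int)) : Prop := out = get_houses_alt directions
instance (directions : String) (out : List (Int × Int)) : Decidable (Spec_get_houses directions out) := by unfold Spec_get_houses; infer_instance

-- ===== CLAIM (what is proved, stated in full; the proofs are below) =====
def Claim_equal_get_houses : Prop := ∀ (directions : String), Dom_get_houses directions → Spec_get_houses directions (get_houses directions)

-- ===== LEMMAS AND PROOFS =====

-- the common reference: the path as a prefix sum
def get_houses_add (p q : Int × Int) : Int × Int := (p.1 + q.1, p.2 + q.2)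

def get_houses_path (l : List Char) : List (Int × Int) :=
  List.scanl get_houses_add (0, 0) (l.map get_houses_delta)

theorem get_houses_step_delta (p : Int × Int) (acc : List (Int × Int)) (d : Char) :
    get_houses_step (p, acc) d = (get_houses_add p (get_houses_delta d), acc ++ [get_houses_add p (get_houses_delta d)]) := by
  simp only [get_houses_step, get_houses_delta, get_houses_add]
  split_ifs <;> simp [sub_eq_add_neg]

theorem get_houses_scanl_head (p : Int × Int) (l : List (Int × Int)) :
    p :: (List.scanl get_houses_add p l).tail = List.scanl get_houses_add p l := by
  cases l <;> simp [List.scanl]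

theorem get_houses_loop (l : List Char) (p : Int × Int) (acc : List (Int × Int)) :
    (l.foldl get_houses_step (p, acc)).2 = acc ++ (List.scanl get_houses_add p (l.map get_houses_delta)).tail := by
  induction l generalizing p acc with
  | nil => simp
  | cons d ds ih =>
    simp only [List.foldl_cons, List.map_cons, List.scanl_cons, List.tail_cons,
      get_houses_step_delta]
    rw [ih]; simp [get_houses_scanl_head]

-- A equals the prefix-sum path
theorem get_houses_eq_path (l : List Char) :
    (l.foldl get_houses_step ((0, 0), [((0 : Int), (0 : Int))])).2 = get_houses_path l := by
  rw [get_houses_loop, get_houses_path, ← get_houses_scanl_head]; rfl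

-- shifting the start of a scanl by q shifts every entry by q
theorem get_houses_scanl_shift (l : List (Int × Int)) (p q : Int × Int) :
    List.scanl get_houses_add (get_houses_add q p) l
      = (List.scanl get_houses_add p l).map (get_houses_add q) := by
  induction l generalizing p with
  | nil => rfl
  | cons x xs ih =>
    simp only [List.scanl_cons, List.map_cons]
    have h : get_houses_add (get_houses_add q p) x = get_houses_add q (get_houses_add p x) := by
      simp [get_houses_add, add_assoc]
    rw [h, ih]

theorem get_houses_scanl_append (u v : List (Int × Int)) (p : Int × Int) :
    List.scanl get_houses_add p (u ++ v)
      = List.scanl get_houses_add p u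
        ++ (List.scanl get_houses_add (u.foldl get_houses_add p) v).tail := by
  induction u generalizing p with
  | nil =>
    simp only [List.nil_append, List.scanl_nil, List.foldl_nil]
    exact (get_houses_scanl_head p v).symm
  | cons x xs ih => simp only [List.cons_append, List.scanl_cons, List.foldl_cons, ih]

theorem get_houses_scanl_getLast? (l : List (Int × Int)) (p : Int × Int) :
    (List.scanl get_houses_add p l).getLast? = some (l.foldl get_houses_add p) := by
  induction l generalizing p with
  | nil => rfl
  | cons x xs ih =>
    simp only [List.scanl_cons, List.foldl_cons]
    rw [List.getLast?_cons, ih]; rfl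

theorem get_houses_add_zero (q : Int × Int) : get_houses_add (0, 0) q = q := by
  simp [get_houses_add]

-- B equals the prefix-sum path
theorem get_houses_rec_eq_path : ∀ (n : ℕ) (l : List Char), l.length ≤ n →
    get_houses_rec l = get_houses_path l := by
  intro n
  induction n with
  | zero =>
    intro l hl
    have : l = [] := List.length_eq_zero_iff.mp (Nat.le_zero.mp hl)
    subst this; simp [get_houses_rec, get_houses_path]
  | succ n ih =>
    intro l hl
    match l with
    | [] => simp [get_houses_rec, get_houses_path]
    | [d] =>
      simp [get_houses_rec, get_houses_path, List.scanl, get_houses_add_zero]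
    | d₁ :: d₂ :: rest =>
      rw [get_houses_rec]
      have h2 : 2 ≤ (d₁ :: d₂ :: rest).length := by simp
      set l' := d₁ :: d₂ :: rest with hl'
      set mid := l'.length / 2 with hmid
      have hmid1 : 1 ≤ mid := by omega
      have hmidlt : mid < l'.length := by omega
      have hlen : l'.length ≤ n + 1 := hl
      have htake : (l'.take mid).length ≤ n := by simp; omega
      have hdrop : (l'.drop mid).length ≤ n := by simp; omega
      simp only [ih _ htake, ih _ hdrop]
      -- left is nonempty, its last element is the fold of its deltas
      have hlast : (PySem.List.pyGet? (get_houses_path (l'.take mid)) (-1)).getD (0, 0)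
          = ((l'.take mid).map get_houses_delta).foldl get_houses_add (0, 0) := by
        rw [PySem.List.pyGet?_neg_one, get_houses_path, get_houses_scanl_getLast?]; rfl
      rw [hlast]
      -- rewrite the map-shift as a shifted scanl tail
      have hshift : ∀ (v : List (Int × Int)) (q : Int × Int),
          (List.scanl get_houses_add (0, 0) v).tail.map (fun r => (q.1 + r.1, q.2 + r.2))
            = (List.scanl get_houses_add q v).tail := by
        intro v q
        have hfun : (fun r : Int × Int => (q.1 + r.1, q.2 + r.2)) = get_houses_add q := rfl
        rw [hfun, List.map_tail, ← get_houses_scanl_shift]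
        congr 2
        simp [get_houses_add]
      rw [get_houses_path, get_houses_path, get_houses_path, hshift]
      have hsplit : l'.map get_houses_delta
          = (l'.take mid).map get_houses_delta ++ (l'.drop mid).map get_houses_delta := by
        rw [← List.map_append, List.take_append_drop]
      rw [hsplit, get_houses_scanl_append]

-- ===== VERDICT (by name: the statement is the Claim_ definition above) =====
theorem get_houses_spec : Claim_equal_get_houses := by
  intro directions _
  unfold Spec_get_houses get_houses get_houses_alt
  rw [get_houses_eq_path, get_houses_rec_eq_path directions.toList.length _ le_rfl]
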